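-- pv_equiv track=rewrite | github.com/anam-org/metaxy | docs/.mkdocs-metaxy/src/mkdocs_metaxy/config/markdown_ext.py | _calculate_field_depth
-- ===== SOURCE A (Python) =====
-- from typing import Any
--
-- def _calculate_field_depth(
--     original_path: list[str], nested_model_paths: dict[tuple, Any]
-- ) -> int:
--     """Calculate nesting depth for a field."""
--     depth = 0
--     for parent_path in nested_model_paths:
--         if len(parent_path) < len(original_path):
--             if original_path[: len(parent_path)] == list(parent_path):
--                 depth += 1
--     return depth
-- ===== SOURCE B (Python) =====
-- def _calculate_field_depth(
--     original_path: list[str], nested_model_paths: dict[tuple, object]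
-- ) -> int:
--     """Calculate nesting depth for a field."""
--     return sum(
--         1
--         for i in range(len(original_path))
--         if tuple(original_path[:i]) in nested_model_paths
--     )
-- ===== Notes on version B (the rewrite author's own statement) =====
-- stated objective: alternative
-- what changed: Instead of scanning every dict key and prefix-comparing it against the path, B enumerates the proper prefixes of the path and tests each with a dict-membership lookup; it trades dependence on the number of keys for dependence on the path length.
import Mathlib
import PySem

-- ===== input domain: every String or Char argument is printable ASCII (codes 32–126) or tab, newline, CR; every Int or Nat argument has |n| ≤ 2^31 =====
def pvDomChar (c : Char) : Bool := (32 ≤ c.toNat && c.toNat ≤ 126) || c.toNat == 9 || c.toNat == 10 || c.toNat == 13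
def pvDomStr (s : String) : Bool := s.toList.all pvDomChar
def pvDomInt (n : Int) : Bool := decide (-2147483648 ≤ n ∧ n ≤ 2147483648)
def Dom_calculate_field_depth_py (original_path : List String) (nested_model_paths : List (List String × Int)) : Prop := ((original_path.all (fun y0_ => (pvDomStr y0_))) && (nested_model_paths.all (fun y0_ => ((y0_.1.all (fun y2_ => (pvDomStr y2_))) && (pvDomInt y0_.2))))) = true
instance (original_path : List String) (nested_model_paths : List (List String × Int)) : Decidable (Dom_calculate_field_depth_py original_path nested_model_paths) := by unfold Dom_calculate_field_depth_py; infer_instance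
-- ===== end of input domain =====

-- B enumerates the proper prefixes of the path and tests dict membership, instead of
-- scanning every dict key and prefix-comparing it (alternative: key-count-independent, path-length-quadratic).

-- ===== PORT A =====
-- for parent_path in nested_model_paths: if len < len(path) and path[:len] == list(parent): depth += 1
def calculate_field_depth_py (original_path : List String) (nested_model_paths : List (List String × Int)) : Int :=
  nested_model_paths.foldl
    (fun depth kv =>
      if kv.1.length < original_path.length then
        if original_path.take kv.1.length = kv.1 then depth + 1 else depth
      else depth)
    0

-- ===== PORT B =====
-- sum(1 for i in range(len(path)) if tuple(path[:i]) in dict)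
def calculate_field_depth_py_alt (original_path : List String) (nested_model_paths : List (List String × Int)) : Int :=
  (List.range original_path.length).foldl
    (fun acc i =>
      if (nested_model_paths.map Prod.fst).contains (original_path.take i) then acc + 1 else acc)
    0

-- ===== PRECONDITION & SPEC =====
-- Pre_ requires the association list to have pairwise-distinct keys: it models a Python
-- dict, whose keys are necessarily distinct, so no Python input is excluded.
def Pre_calculate_field_depth_py (original_path : List String) (nested_model_paths : List (List String × Int)) : Prop :=
  (nested_model_paths.map Prod.fst).Nodup
instance (original_path : List String) (nested_model_paths : List (List String × Int)) : Decidable (Pre_calculate_field_depth_py original_path nested_model_paths) := by unfold Pre_calculate_field_depth_py; infer_instance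
def pvWitness_calculate_field_depth_py : List String × (List (List String × Int)) :=
  (["a", "b"], [(["a"], 1), ([], 4)])

def Spec_calculate_field_depth_py (original_path : List String) (nested_model_paths : List (List String × Int)) (out : Int) : Prop := out = calculate_field_depth_py_alt original_path nested_model_paths
instance (original_path : List String) (nested_model_paths : List (List String × Int)) (out : Int) : Decidable (Spec_calculate_field_depth_py original_path nested_model_paths out) := by unfold Spec_calculate_field_depth_py; infer_instance

-- ===== CLAIM (what is proved, stated in full; the proofs are below) =====
def Claim_equal_calculate_field_depth_py : Prop := ∀ (original_path : List String) (nested_model_paths : List (List String × Int)), Dom_calculate_field_depth_py original_path nested_model_paths → Pre_calculate_field_depth_py original_path nested_model_paths → Spec_calculate_field_depth_py original_path nested_model_paths (calculate_field_depth_py original_path nested_model_paths)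

-- ===== LEMMAS AND PROOFS =====

-- countP of a disjunction of pointwise-disjoint predicates splits into a sum
theorem countP_or_disjoint {α : Type} (a b : α → Bool) (l : List α)
    (h : ∀ x ∈ l, ¬(a x = true ∧ b x = true)) :
    l.countP (fun x => a x || b x) = l.countP a + l.countP b := by
  induction l with
  | nil => simp
  | cons x t ih =>
    have ht : ∀ y ∈ t, ¬(a y = true ∧ b y = true) := fun y hy => h y (List.mem_cons_of_mem _ hy)
    have hx := h x (List.mem_cons_self)
    simp only [List.countP_cons, ih ht]
    by_cases ha : a x = true <;> by_cases hb : b x = true <;> simp [ha, hb] at hx ⊢ <;> omega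

-- number of i < L with p.take i = k is 1 iff k is a proper prefix, else 0
theorem countP_take_eq {p k : List String} :
    (List.range p.length).countP (fun i => p.take i == k)
      = (if k.length < p.length ∧ p.take k.length = k then 1 else 0) := by
  by_cases h : k.length < p.length ∧ p.take k.length = k
  · rw [if_pos h]
    have hcongr : ∀ i ∈ List.range p.length,
        ((p.take i == k) = true ↔ (i == k.length) = true) := by
      intro i hi
      rcases h with ⟨hlen, htake⟩
      have hi' : i < p.length := List.mem_range.mp hi
      by_cases he : p.take i = k
      · have : i = k.length := by
          have := congrArg List.length he
          simpa [List.length_take, Nat.min_eq_left (Nat.le_of_lt hi')] using this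
        simp [this, htake]
      · have : i ≠ k.length := by
          intro hik; exact he (by rw [hik]; exact htake)
        simp [he, this]
    rw [List.countP_congr hcongr]
    have : (List.range p.length).countP (fun i => i == k.length)
        = (List.range p.length).count k.length := by
      simp [List.count]
    rw [this, List.count_eq_one_of_mem (List.nodup_range) (List.mem_range.mpr h.1)]
  · rw [if_neg h]
    apply List.countP_eq_zero.mpr
    intro i hi hcon
    have hi' : i < p.length := List.mem_range.mp hi
    have he : p.take i = k := by simpa using hcon
    have hlen : i = k.length := by
      have := congrArg List.length he
      simpa [List.length_take, Nat.min_eq_left (Nat.le_of_lt hi')] using this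
    exact h ⟨hlen ▸ hi', hlen ▸ he⟩

-- B's range loop counts exactly the keys that are proper prefixes, for Nodup keys
theorem range_count_eq_key_count (p : List String) (keys : List (List String))
    (hnd : keys.Nodup) :
    (List.range p.length).countP (fun i => keys.contains (p.take i))
      = keys.countP (fun k => decide (k.length < p.length) && decide (p.take k.length = k)) := by
  induction keys with
  | nil => simp
  | cons k t ih =>
    rcases List.nodup_cons.mp hnd with ⟨hk, hndt⟩
    have hsplit : ∀ i ∈ List.range p.length,
        (((k :: t).contains (p.take i)) = true
          ↔ ((p.take i == k) || t.contains (p.take i)) = true) := by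
      intro i _; simp [List.mem_cons]
    rw [List.countP_congr hsplit,
        countP_or_disjoint (fun i => p.take i == k) (fun i => t.contains (p.take i))]
    · rw [countP_take_eq, ih hndt, List.countP_cons]
      by_cases h : k.length < p.length ∧ p.take k.length = k
      · simp [h.1, h.2]
        omega
      · have : (decide (k.length < p.length) && decide (p.take k.length = k)) = false := by
          by_cases h1 : k.length < p.length <;> by_cases h2 : p.take k.length = k <;>
            simp [h1, h2] <;> exact absurd ⟨h1, h2⟩ h
        simp [this, h]
    · intro i _ ⟨ha, hb⟩
      have he : p.take i = k := by simpa using ha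
      have : k ∈ t := by
        have := List.contains_iff_mem.mp hb
        rwa [he] at this
      exact hk this

-- A's fold is a countP over the key list
theorem portA_eq_countP (p : List String) (ms : List (List String × Int)) :
    calculate_field_depth_py p ms
      = ((ms.map Prod.fst).countP
          (fun k => decide (k.length < p.length) && decide (p.take k.length = k)) : Int) := by
  unfold calculate_field_depth_py
  have hcongr : ∀ (d : Int) (kv : List String × Int),
      (if kv.1.length < p.length then
        if p.take kv.1.length = kv.1 then d + 1 else d
       else d)
      = (if (decide (kv.1.length < p.length) && decide (p.take kv.1.length = kv.1)) = true
         then d + 1 else d) := by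
    intro d kv
    by_cases h1 : kv.1.length < p.length <;> by_cases h2 : p.take kv.1.length = kv.1 <;>
      simp [h1, h2]
  calc ms.foldl (fun depth kv =>
        if kv.1.length < p.length then
          if p.take kv.1.length = kv.1 then depth + 1 else depth
        else depth) 0
      = ms.foldl (fun depth kv =>
          if (decide (kv.1.length < p.length) && decide (p.take kv.1.length = kv.1)) = true
          then depth + 1 else depth) 0 := by
        exact PySem.List.foldl_congr_mem ms _ _ 0 (fun d kv _ => hcongr d kv)
    _ = ((ms.map Prod.fst).countP
          (fun k => decide (k.length < p.length) && decide (p.take k.length = k)) : Int) := by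
        rw [PySem.List.foldl_if_add_one]
        simp [List.countP_map, Function.comp_def]

-- B's fold is a countP over the range
theorem portB_eq_countP (p : List String) (ms : List (List String × Int)) :
    calculate_field_depth_py_alt p ms
      = ((List.range p.length).countP (fun i => (ms.map Prod.fst).contains (p.take i)) : Int) := by
  unfold calculate_field_depth_py_alt
  rw [PySem.List.foldl_if_add_one]
  simp

-- ===== VERDICT (by name: the statement is the Claim_ definition above) =====
theorem calculate_field_depth_py_spec : Claim_equal_calculate_field_depth_py := by
  intro p ms _ hpre
  unfold Spec_calculate_field_depth_py
  rw [portA_eq_countP, portB_eq_countP,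
      range_count_eq_key_count p (ms.map Prod.fst) hpre]
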